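-- pv_equiv track=rewrite | github.com/miliar/Code_Jam_Webscraper | solutions_python/Problem_76/639.py | recurse
-- ===== SOURCE A (Python) =====
-- def patsum(candylist):
--     if len(candylist) == 0:
--         return -1
--     total = 0
--     for i in candylist:
--         total ^= int(i)
--     return total
--
-- def realsum(candylist):
--     total = 0
--     for i in candylist:
--         total += int(i)
--     return total
--
-- def recurse(candy, a, b):
--     if len(candy) == 0:
--         suma = patsum(a)
--         sumb = patsum(b)
--         #print suma, sumb
--         if (suma == sumb):
--             #print a, b
--             return max(realsum(a), realsum(b))
--         else:
--             return -1
--     curr = candy[-1]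
--     candynew = candy[:-1]
--     aplus = a[:]
--     aplus.append(curr)
--     atotal = recurse(candynew, aplus, b)
--
--     bplus = b[:]
--     bplus.append(curr)
--     btotal = recurse(candynew, a, bplus)
--
--     return max(atotal, btotal)
-- ===== SOURCE B (Python) =====
-- def _xor(xs):
--     t = 0
--     for c in xs:
--         t ^= c
--     return t
--
--
-- def patsum(candylist):
--     if len(candylist) == 0:
--         return -1
--     return _xor(candylist)
--
--
-- def recurse(candy, a, b):
--     # Every way of handing out the candies falls into one of three classes:
--     # all candy onto b's pile, all onto a's pile, or a proper split (both
--     # piles receive a candy).  Within each class the feasibility test (equal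
--     # pile signatures) is one fixed condition, so each class contributes its
--     # best score directly; an infeasible assignment scores -1.
--     va = max(sum(a), sum(b + candy)) if patsum(a) == patsum(b + candy) else -1
--     vb = max(sum(a + candy), sum(b)) if patsum(a + candy) == patsum(b) else -1
--     best = max(va, vb)
--     if len(candy) >= 2:
--         # proper split: both final piles are nonempty, so the condition
--         # xor(a)^xor(S) == xor(b)^xor(candy)^xor(S) collapses to
--         # xor(a) == xor(b)^xor(candy), the same for every split; only the
--         # extreme proper-nonempty-subset sums of candy then matter.
--         if _xor(a) == _xor(b) ^ _xor(candy):
--             # one right-to-left pass: s = suffix sum, hi/lo = extreme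
--             # proper-nonempty-subset sums of the suffix (None while len < 2)
--             s, hi, lo = 0, None, None
--             for i, c in enumerate(reversed(candy)):
--                 if i >= 1:
--                     hi = max(c, s) if hi is None else max(c, c + hi, s, hi)
--                     lo = min(c, s) if lo is None else min(c, c + lo, s, lo)
--                 s += c
--             v = max(sum(a) + hi, sum(b) + s - lo)
--         else:
--             v = -1
--         best = max(best, v)
--     return best
-- ===== Notes on version B (the rewrite author's own statement) =====
-- stated objective: faster
-- what changed: A tries all 2^n assignments of candies to the two piles recursively; B gets the same answer in O(n) by splitting the assignments into three classes (all candy to one pile, all to the other, proper split) whose feasibility test is one fixed signature equality each, the proper class needing only the extreme subset sums from a single right-to-left pass.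
import Mathlib
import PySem

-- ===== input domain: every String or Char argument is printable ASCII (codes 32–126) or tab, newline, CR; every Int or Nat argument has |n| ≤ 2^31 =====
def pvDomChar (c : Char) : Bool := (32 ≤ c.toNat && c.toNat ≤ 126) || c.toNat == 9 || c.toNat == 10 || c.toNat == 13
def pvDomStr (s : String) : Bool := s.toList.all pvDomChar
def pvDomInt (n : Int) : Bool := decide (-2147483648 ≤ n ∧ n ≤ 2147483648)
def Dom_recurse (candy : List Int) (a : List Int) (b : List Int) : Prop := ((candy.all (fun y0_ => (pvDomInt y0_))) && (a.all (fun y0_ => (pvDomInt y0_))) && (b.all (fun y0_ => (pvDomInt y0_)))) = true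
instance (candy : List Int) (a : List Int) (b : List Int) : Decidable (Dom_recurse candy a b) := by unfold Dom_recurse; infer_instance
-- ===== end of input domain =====

-- B replaces A's exponential try-both-piles recursion by an O(n) case split:
-- the three classes of splits (all candy to one pile, to the other, proper)
-- each have one fixed feasibility condition, so one linear pass suffices.

-- ===== PORT A =====
def patsum (candylist : List Int) : Int :=
  if candylist.length = 0 then -1
  else candylist.foldl (fun total i => PySem.Int.bxor total i) 0

def realsum (candylist : List Int) : Int :=
  candylist.foldl (fun total i => total + i) 0

def recurse (candy : List Int) (a : List Int) (b : List Int) : Int :=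
  if h : candy.length = 0 then
    let suma := patsum a
    let sumb := patsum b
    if suma = sumb then max (realsum a) (realsum b) else -1
  else
    let curr := PySem.List.pyGetD candy (-1) 0      -- candy[-1]; candy ≠ [] in this branch, so exact
    let candynew := PySem.List.slice candy none (some (-1))   -- candy[:-1]
    let aplus := a ++ [curr]                         -- a[:] then .append(curr)
    let atotal := recurse candynew aplus b
    let bplus := b ++ [curr]                         -- b[:] then .append(curr)
    let btotal := recurse candynew a bplus
    max atotal btotal
termination_by candy.length
decreasing_by
  all_goals (simp only [PySem.List.slice_to_neg_one, List.length_dropLast]; omega)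

-- ===== PORT B =====
-- _xor
def xorList (xs : List Int) : Int := xs.foldl (fun t c => PySem.Int.bxor t c) 0

-- B's patsum
def bPatsum (candylist : List Int) : Int :=
  if candylist.length = 0 then -1 else xorList candylist

-- Python's sum()
def sumList (xs : List Int) : Int := xs.foldl (fun t c => t + c) 0

-- the right-to-left s/hi/lo loop of Source B ('for i, c in enumerate(reversed(candy))'),
-- written as the same scan by recursion on suffixes: for each suffix, (s, hi?, lo?) =
-- (suffix sum, extreme proper-nonempty-subset sums of the suffix, none while len < 2)
def hiLo : List Int → Int × Option Int × Option Int
  | [] => (0, none, none)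
  | c :: r =>
    let p := hiLo r
    let s := p.1
    (c + s,
     if r.isEmpty then none
     else some (match p.2.1 with
                | none => max c s
                | some h => max (max c (c + h)) (max s h)),
     if r.isEmpty then none
     else some (match p.2.2 with
                | none => min c s
                | some l => min (min c (c + l)) (min s l)))

def recurse_alt (candy : List Int) (a : List Int) (b : List Int) : Int :=
  let va := if bPatsum a = bPatsum (b ++ candy)
            then max (sumList a) (sumList (b ++ candy)) else -1
  let vb := if bPatsum (a ++ candy) = bPatsum b
            then max (sumList (a ++ candy)) (sumList b) else -1
  let best := max va vb
  if 2 ≤ candy.length then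
    let v := if xorList a = PySem.Int.bxor (xorList b) (xorList candy) then
               let t := hiLo candy
               -- candy.length ≥ 2, so both options are `some`; the default is unreachable
               max (sumList a + t.2.1.getD 0) (sumList b + t.1 - t.2.2.getD 0)
             else -1
    max best v
  else best

-- ===== PRECONDITION & SPEC =====
def Spec_recurse (candy : List Int) (a : List Int) (b : List Int) (out : Int) : Prop := out = recurse_alt candy a b
instance (candy : List Int) (a : List Int) (b : List Int) (out : Int) : Decidable (Spec_recurse candy a b out) := by unfold Spec_recurse; infer_instance

-- ===== CLAIM (what is proved, stated in full; the proofs are below) =====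
def Claim_equal_recurse : Prop := ∀ (candy : List Int) (a : List Int) (b : List Int), Dom_recurse candy a b → Spec_recurse candy a b (recurse candy a b)

-- ===== LEMMAS AND PROOFS =====

-- xor algebra ----------------------------------------------------------------
lemma bxor_eq_ixor (a b : Int) : PySem.Int.bxor a b = Int.xor a b := by
  rcases a with m | m <;> rcases b with n | n <;>
    simp [PySem.Int.bxor, Int.xor, Int.negSucc_eq] <;> omega

lemma ixor_assoc (a b c : Int) : Int.xor (Int.xor a b) c = Int.xor a (Int.xor b c) := by
  rcases a with m | m <;> rcases b with n | n <;> rcases c with k | k <;>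
    simp [Int.xor, Nat.xor_assoc]

lemma bxor_assoc (a b c : Int) :
    PySem.Int.bxor (PySem.Int.bxor a b) c = PySem.Int.bxor a (PySem.Int.bxor b c) := by
  simp [bxor_eq_ixor, ixor_assoc]

lemma zero_bxor (a : Int) : PySem.Int.bxor 0 a = a := by
  rw [PySem.Int.bxor_comm, PySem.Int.bxor_zero]

lemma bxor_cancel_right (x c : Int) : PySem.Int.bxor (PySem.Int.bxor x c) c = x := by
  rw [bxor_assoc, PySem.Int.bxor_self, PySem.Int.bxor_zero]

lemma bxor_move_right (x p y : Int) :
    (PySem.Int.bxor x p = y) ↔ (x = PySem.Int.bxor y p) := by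
  constructor
  · rintro rfl; rw [bxor_cancel_right]
  · rintro rfl; rw [bxor_cancel_right]

-- fold facts ------------------------------------------------------------------
lemma foldl_bxor_hoist (l : List Int) (a : Int) :
    l.foldl (fun t c => PySem.Int.bxor t c) a
      = PySem.Int.bxor a (l.foldl (fun t c => PySem.Int.bxor t c) 0) := by
  induction l generalizing a with
  | nil => simp [PySem.Int.bxor_zero]
  | cons c l ih =>
    simp only [List.foldl_cons]
    rw [ih (PySem.Int.bxor a c), ih (PySem.Int.bxor 0 c), zero_bxor, bxor_assoc]

lemma xorList_cons (c : Int) (l : List Int) :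
    xorList (c :: l) = PySem.Int.bxor c (xorList l) := by
  simp only [xorList, List.foldl_cons]
  rw [foldl_bxor_hoist, zero_bxor]

lemma xorList_append_singleton (l : List Int) (x : Int) :
    xorList (l ++ [x]) = PySem.Int.bxor (xorList l) x := by
  simp [xorList, List.foldl_append]

lemma xorList_append (l₁ l₂ : List Int) :
    xorList (l₁ ++ l₂) = PySem.Int.bxor (xorList l₁) (xorList l₂) := by
  simp only [xorList, List.foldl_append]
  rw [foldl_bxor_hoist]

lemma foldl_add_hoist (l : List Int) (a : Int) :
    l.foldl (fun t c => t + c) a = a + l.foldl (fun t c => t + c) 0 := by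
  induction l generalizing a with
  | nil => simp
  | cons c l ih =>
    simp only [List.foldl_cons]
    rw [ih (a + c), ih (0 + c)]; ring

lemma sumList_cons (c : Int) (l : List Int) : sumList (c :: l) = c + sumList l := by
  simp only [sumList, List.foldl_cons]
  rw [foldl_add_hoist]; ring

lemma sumList_append_singleton (l : List Int) (x : Int) :
    sumList (l ++ [x]) = sumList l + x := by
  simp [sumList, List.foldl_append]

lemma sumList_append (l₁ l₂ : List Int) :
    sumList (l₁ ++ l₂) = sumList l₁ + sumList l₂ := by
  simp only [sumList, List.foldl_append]
  rw [foldl_add_hoist]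

lemma hiLo_fst (l : List Int) : (hiLo l).1 = sumList l := by
  induction l with
  | nil => simp [hiLo, sumList]
  | cons c r ih => simp [hiLo, sumList_cons, ih]

-- the generalized search: A's recursion rewritten over aggregate state ---------
def go : List Int → Bool → Int → Int → Bool → Int → Int → Int
  | [], aE, sA, xA, bE, sB, xB =>
      if (if aE then (-1 : Int) else xA) = (if bE then (-1 : Int) else xB) then max sA sB else -1
  | c :: r, aE, sA, xA, bE, sB, xB =>
      max (go r false (sA + c) (PySem.Int.bxor xA c) bE sB xB)
          (go r aE sA xA false (sB + c) (PySem.Int.bxor xB c))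

lemma go_append (l : List Int) (x : Int) :
    ∀ aE sA xA bE sB xB, go (l ++ [x]) aE sA xA bE sB xB
      = max (go l false (sA + x) (PySem.Int.bxor xA x) bE sB xB)
            (go l aE sA xA false (sB + x) (PySem.Int.bxor xB x)) := by
  induction l with
  | nil => intros; simp [go]
  | cons c l ih =>
    intro aE sA xA bE sB xB
    show max (go (l ++ [x]) false (sA + c) (PySem.Int.bxor xA c) bE sB xB)
             (go (l ++ [x]) aE sA xA false (sB + c) (PySem.Int.bxor xB c)) = _
    rw [ih, ih]
    show _ = max (max (go l false (sA + x + c) (PySem.Int.bxor (PySem.Int.bxor xA x) c) bE sB xB)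
                      (go l false (sA + x) (PySem.Int.bxor xA x) false (sB + c) (PySem.Int.bxor xB c)))
                 (max (go l false (sA + c) (PySem.Int.bxor xA c) false (sB + x) (PySem.Int.bxor xB x))
                      (go l aE sA xA false (sB + x + c) (PySem.Int.bxor (PySem.Int.bxor xB x) c)))
    rw [show sA + c + x = sA + x + c by ring, show sB + c + x = sB + x + c by ring,
        show PySem.Int.bxor (PySem.Int.bxor xA c) x = PySem.Int.bxor (PySem.Int.bxor xA x) c by
          rw [bxor_assoc, bxor_assoc, PySem.Int.bxor_comm c x],
        show PySem.Int.bxor (PySem.Int.bxor xB c) x = PySem.Int.bxor (PySem.Int.bxor xB x) c by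
          rw [bxor_assoc, bxor_assoc, PySem.Int.bxor_comm c x]]
    omega

lemma patsum_eq (l : List Int) :
    patsum l = if (l.length == 0 : Bool) then -1 else xorList l := by
  by_cases h : l.length = 0 <;> simp [patsum, xorList, h]

lemma recurse_eq_go (candy : List Int) :
    ∀ a b, recurse candy a b
      = go candy (a.length == 0) (sumList a) (xorList a) (b.length == 0) (sumList b) (xorList b) := by
  induction candy using List.reverseRecOn with
  | nil =>
    intro a b
    rw [recurse]
    simp [go, patsum_eq, realsum, sumList]
  | append_singleton l x ih =>
    intro a b
    rw [recurse]
    have hlen : ¬ (l ++ [x]).length = 0 := by simp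
    simp only [hlen, dif_neg, not_false_iff]
    rw [PySem.List.pyGetD_neg_one_append_singleton, PySem.List.slice_to_neg_one,
        List.dropLast_concat]
    rw [ih (a ++ [x]) b, ih a (b ++ [x]), go_append]
    simp [sumList_append_singleton, xorList_append_singleton]

-- proof-side closed form over aggregate state ---------------------------------
def core (candy : List Int) (aE : Bool) (sA xA : Int) (bE : Bool) (sB xB : Int) : Int :=
  let n := candy.length
  let sC := sumList candy
  let xC := xorList candy
  let effA := if aE then -1 else xA
  let effB := if bE then -1 else xB
  if n = 0 then
    if effA = effB then max sA sB else -1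
  else
    let best := max (if effA = PySem.Int.bxor xB xC then max sA (sB + sC) else -1)
                    (if PySem.Int.bxor xA xC = effB then max (sA + sC) sB else -1)
    if 2 ≤ n then
      let t := hiLo candy
      let hi := t.2.1.getD 0
      let lo := t.2.2.getD 0
      max best (if xA = PySem.Int.bxor xB xC then max (sA + hi) (sB + sC - lo) else -1)
    else best

-- condition normalizations for the main induction ----------------------------
lemma cond_move1 (xA xB c Y : Int) :
    (PySem.Int.bxor xA c = PySem.Int.bxor xB Y) ↔ (xA = PySem.Int.bxor xB (PySem.Int.bxor c Y)) := by
  rw [bxor_move_right, bxor_assoc, PySem.Int.bxor_comm Y c]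

lemma cond_move2 (xA c Y y : Int) :
    (PySem.Int.bxor (PySem.Int.bxor xA c) Y = y) ↔ (PySem.Int.bxor xA (PySem.Int.bxor c Y) = y) := by
  rw [bxor_assoc]

lemma cond_move3 (xB c Y : Int) (e : Int) :
    (e = PySem.Int.bxor (PySem.Int.bxor xB c) Y) ↔ (e = PySem.Int.bxor xB (PySem.Int.bxor c Y)) := by
  rw [bxor_assoc]

lemma cond_move4 (xA xB c Y : Int) :
    (PySem.Int.bxor xA Y = PySem.Int.bxor xB c) ↔ (xA = PySem.Int.bxor xB (PySem.Int.bxor c Y)) := by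
  rw [bxor_move_right, bxor_assoc]

lemma cond_move5 (xA xB c Y : Int) :
    (xA = PySem.Int.bxor (PySem.Int.bxor xB c) Y) ↔ (xA = PySem.Int.bxor xB (PySem.Int.bxor c Y)) := by
  rw [bxor_assoc]


lemma step2 (Pq Pa' Pb' P4 Pa Pb Q : Prop)
    [Decidable Pq] [Decidable Pa'] [Decidable Pb'] [Decidable P4]
    [Decidable Pa] [Decidable Pb] [Decidable Q]
    (hq : Pq ↔ Q) (ha : Pa' ↔ Pa) (hb : Pb' ↔ Pb) (h4 : P4 ↔ Q)
    (sA sB c d : Int) :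
    max (if Pq then max (sA + c) (sB + d) else -1)
      (max (if Pb' then max (sA + c + d) sB else -1)
        (max (if Pa' then max sA (sB + c + d) else -1)
          (if P4 then max (sA + d) (sB + c) else -1))) =
    max (if Pa then max sA (sB + (c + d)) else -1)
      (max (if Pb then max (sA + (c + d)) sB else -1)
        (if Q then max (sA + max c d) (sB + (c + d) - min c d) else -1)) := by
  have e1 : sA + max c d = max (sA + c) (sA + d) := by rw [max_add_add_left]
  have e2 : sB + (c + d) - min c d = max (sB + c) (sB + d) := by
    rcases le_total c d with h | h <;>
      rw [show min c d = if c ≤ d then c else d from rfl] <;> simp [h] <;> omega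
  simp only [hq, ha, hb, h4, e1, e2]
  split_ifs
  all_goals (ring_nf; apply le_antisymm <;>
    (simp only [max_le_iff]
     simp only [le_max_iff, le_refl, true_or, or_true, and_self]))

lemma step3 (Pq Pa' Pb' P4 P5 Pa Pb Q : Prop)
    [Decidable Pq] [Decidable Pa'] [Decidable Pb'] [Decidable P4] [Decidable P5]
    [Decidable Pa] [Decidable Pb] [Decidable Q]
    (hq : Pq ↔ Q) (ha : Pa' ↔ Pa) (hb : Pb' ↔ Pb) (h4 : P4 ↔ Q) (h5 : P5 ↔ Q)
    (sA sB c S Hr Lr : Int) :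
    max (if Pq then max (sA + c) (sB + S) else -1)
      (max (if Pb' then max (sA + c + S) sB else -1)
        (max (if Pq then max (sA + c + Hr) (sB + S - Lr) else -1)
          (max (if Pa' then max sA (sB + c + S) else -1)
            (max (if P4 then max (sA + S) (sB + c) else -1)
              (if P5 then max (sA + Hr) (sB + c + S - Lr) else -1))))) =
    max (if Pa then max sA (sB + (c + S)) else -1)
      (max (if Pb then max (sA + (c + S)) sB else -1)
        (if Q then
          max (sA + max c (max (c + Hr) (max S Hr)))
            (sB + (c + S) - min c (min (c + Lr) (min S Lr)))
        else -1)) := by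
  have e1 : sA + max c (max (c + Hr) (max S Hr))
      = max (sA + c) (max (sA + (c + Hr)) (max (sA + S) (sA + Hr))) := by
    rw [max_add_add_left, max_add_add_left, max_add_add_left]
  have e2 : sB + (c + S) - min c (min (c + Lr) (min S Lr))
      = max (sB + S) (max (sB + (S - Lr)) (max (sB + c) (sB + (c + S - Lr)))) := by
    rcases le_total c (c + Lr) with h1 | h1 <;> rcases le_total S Lr with h2 | h2 <;>
      simp [min_def, max_def] <;> split_ifs <;> omega
  simp only [hq, ha, hb, h4, h5, e1, e2]
  split_ifs
  all_goals (ring_nf; apply le_antisymm <;>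
    (simp only [max_le_iff]
     simp only [le_max_iff, le_refl, true_or, or_true, and_self]))

lemma hiLo_cons_of_ne (c : Int) (r : List Int) (h : r.isEmpty = false) :
    hiLo (c :: r) = (c + (hiLo r).1,
      some (match (hiLo r).2.1 with
            | none => max c (hiLo r).1
            | some h => max (max c (c + h)) (max (hiLo r).1 h)),
      some (match (hiLo r).2.2 with
            | none => min c (hiLo r).1
            | some l => min (min c (c + l)) (min (hiLo r).1 l))) := by
  simp [hiLo, h]

-- the generalized search equals the closed form --------------------------------
lemma go_eq_core (candy : List Int) :
    ∀ aE sA xA bE sB xB, go candy aE sA xA bE sB xB = core candy aE sA xA bE sB xB := by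
  induction candy with
  | nil => intros; simp [go, core]
  | cons c rest ih =>
    intro aE sA xA bE sB xB
    show max (go rest false (sA + c) (PySem.Int.bxor xA c) bE sB xB)
             (go rest aE sA xA false (sB + c) (PySem.Int.bxor xB c)) = _
    rw [ih, ih]
    match rest with
    | [] =>
      simp only [core, hiLo, xorList, sumList, List.foldl, List.length_nil, List.length_cons]
      norm_num [zero_bxor]
      exact max_comm _ _
    | [d] =>
      simp only [core, List.length_cons, List.length_nil, hiLo, List.isEmpty_cons,
                 List.isEmpty_nil, xorList, sumList, List.foldl]
      norm_num [zero_bxor, PySem.Int.bxor_zero]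
      exact step2 _ _ _ _ _ _ _ (cond_move1 xA xB c d)
        (cond_move3 xB c d (if aE = true then -1 else xA))
        (cond_move2 xA c d (if bE = true then -1 else xB))
        (cond_move4 xA xB c d) sA sB c d
    | d :: e :: r'' =>
      obtain ⟨Hr, hHr⟩ : ∃ h, (hiLo (d :: e :: r'')).2.1 = some h := ⟨_, rfl⟩
      obtain ⟨Lr, hLr⟩ : ∃ l, (hiLo (d :: e :: r'')).2.2 = some l := ⟨_, rfl⟩
      simp only [core, List.length_cons, xorList_cons, sumList_cons,
                 hiLo_cons_of_ne c (d :: e :: r'') rfl, hHr, hLr, hiLo_fst]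
      norm_num
      exact step3 _ _ _ _ _ _ _ _
        (cond_move1 xA xB c (PySem.Int.bxor d (PySem.Int.bxor e (xorList r''))))
        (cond_move3 xB c (PySem.Int.bxor d (PySem.Int.bxor e (xorList r'')))
          (if aE = true then -1 else xA))
        (cond_move2 xA c (PySem.Int.bxor d (PySem.Int.bxor e (xorList r'')))
          (if bE = true then -1 else xB))
        (cond_move4 xA xB c (PySem.Int.bxor d (PySem.Int.bxor e (xorList r''))))
        (cond_move5 xA xB c (PySem.Int.bxor d (PySem.Int.bxor e (xorList r''))))
        sA sB c (d + (e + sumList r'')) Hr Lr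

-- the closed form over aggregate state is B's program --------------------------
lemma eff_eq_bPatsum (l : List Int) :
    (if (l.length == 0 : Bool) then (-1 : Int) else xorList l) = bPatsum l := by
  by_cases h : l.length = 0 <;> simp [bPatsum, h]

lemma core_eq_alt (candy a b : List Int) :
    core candy (a.length == 0) (sumList a) (xorList a) (b.length == 0) (sumList b) (xorList b)
      = recurse_alt candy a b := by
  match candy with
  | [] =>
    simp only [core, recurse_alt, List.append_nil, List.length_nil, eff_eq_bPatsum]
    norm_num [max_self]
  | c :: rest =>
    have hne : ¬ (c :: rest).length = 0 := by simp
    have hbc : bPatsum (b ++ c :: rest)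
        = PySem.Int.bxor (xorList b) (xorList (c :: rest)) := by
      simp [bPatsum, xorList_append]
    have hac : bPatsum (a ++ c :: rest)
        = PySem.Int.bxor (xorList a) (xorList (c :: rest)) := by
      simp [bPatsum, xorList_append]
    simp only [core, recurse_alt, hne, if_false, eff_eq_bPatsum, hbc, hac,
               sumList_append, hiLo_fst]

-- ===== VERDICT (by name: the statement is the Claim_ definition above) =====
theorem recurse_spec : Claim_equal_recurse := by
  intro candy a b _
  show recurse candy a b = recurse_alt candy a b
  rw [recurse_eq_go, go_eq_core, core_eq_alt]
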